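-- pv_equiv track=rewrite | github.com/zata-zhangtao/transFileServer | main.py | _is_reserved_path
-- ===== SOURCE A (Python) =====
-- def _is_reserved_path(path: str) -> bool:
--     reserved_prefixes = (
--         "upload",
--         "upload-chunk",
--         "upload-status",
--         "download",
--         "files",
--         "delete",
--         "healthz",
--         "docs",
--         "redoc",
--         "openapi.json",
--         "relay",
--         "static",
--     )
--
--     normalized = path.lstrip("/")
--     return any(
--         normalized == prefix or normalized.startswith(f"{prefix}/")
--         for prefix in reserved_prefixes
--     )
-- ===== SOURCE B (Python) =====
-- _RESERVED_NAMES = (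
--     "upload",
--     "upload-chunk",
--     "upload-status",
--     "download",
--     "files",
--     "delete",
--     "healthz",
--     "docs",
--     "redoc",
--     "openapi.json",
--     "relay",
--     "static",
-- )
--
--
-- def _is_reserved_path(path: str) -> bool:
--     # Simultaneous multi-pattern scan: advance all still-matching reserved
--     # names one character at a time along the first path segment.
--     candidates = list(_RESERVED_NAMES)
--     for c in path.lstrip("/"):
--         if c == "/":
--             break
--         candidates = [s[1:] for s in candidates if s[:1] == c]
--     return "" in candidates
-- ===== Notes on version B (the rewrite author's own statement) =====
-- stated objective: alternative
-- what changed: B replaces A's per-prefix scan (equality plus startswith for each of 12 names) by a single left-to-right NFA-style scan of the first path segment that advances a shrinking list of candidate name suffixes one character at a time and accepts iff the empty suffix survives at the segment boundary.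
import Mathlib
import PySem

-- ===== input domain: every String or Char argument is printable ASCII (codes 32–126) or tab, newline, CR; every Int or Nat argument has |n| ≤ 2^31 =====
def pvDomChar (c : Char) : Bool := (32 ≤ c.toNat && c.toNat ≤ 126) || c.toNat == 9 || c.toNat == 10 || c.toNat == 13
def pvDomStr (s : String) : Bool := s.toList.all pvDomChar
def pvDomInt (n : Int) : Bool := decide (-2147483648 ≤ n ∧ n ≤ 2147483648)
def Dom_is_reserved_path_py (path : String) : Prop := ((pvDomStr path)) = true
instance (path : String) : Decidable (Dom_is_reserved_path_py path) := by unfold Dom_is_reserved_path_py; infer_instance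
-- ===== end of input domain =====

-- B replaces A's 12-prefix scan (equality + startswith per prefix) by an NFA-style single scan
-- that advances a shrinking candidate-suffix list character by character; alternative, not faster.

-- ===== PORT A =====
def pvReservedPrefixes : List (List Char) :=
  ["upload".toList, "upload-chunk".toList, "upload-status".toList, "download".toList,
   "files".toList, "delete".toList, "healthz".toList, "docs".toList, "redoc".toList,
   "openapi.json".toList, "relay".toList, "static".toList]

def is_reserved_path_py (path : String) : Bool :=
  -- path.lstrip("/") ported by hand (exact): drop the leading '/' characters
  let normalized := path.toList.dropWhile (fun c => c == '/')
  pvReservedPrefixes.any (fun pre =>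
    normalized == pre || PySem.Chars.startswith normalized (pre ++ ['/']))

-- ===== PORT B =====
def pvReservedNames : List (List Char) :=
  ["upload".toList, "upload-chunk".toList, "upload-status".toList, "download".toList,
   "files".toList, "delete".toList, "healthz".toList, "docs".toList, "redoc".toList,
   "openapi.json".toList, "relay".toList, "static".toList]

-- one step of B's loop body: [s[1:] for s in candidates if s[:1] == c]
def pvAdvance (c : Char) (cands : List (List Char)) : List (List Char) :=
  cands.filterMap (fun s => match s with
    | [] => none
    | d :: ds => if d = c then some ds else none)

-- B's for-loop over the normalized characters, with the 'break' at '/'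
def pvWalk : List Char → List (List Char) → List (List Char)
  | [], cands => cands
  | c :: cs, cands => if c = '/' then cands else pvWalk cs (pvAdvance c cands)

def is_reserved_path_py_alt (path : String) : Bool :=
  -- lstrip("/") ported by hand (exact); then the candidate-filter scan, then '"" in candidates'
  (pvWalk (path.toList.dropWhile (fun c => c == '/')) pvReservedNames).contains []

-- ===== PRECONDITION & SPEC =====
def Spec_is_reserved_path_py (path : String) (out : Bool) : Prop := out = is_reserved_path_py_alt path
instance (path : String) (out : Bool) : Decidable (Spec_is_reserved_path_py path out) := by unfold Spec_is_reserved_path_py; infer_instance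

-- ===== CLAIM (what is proved, stated in full; the proofs are below) =====
def Claim_equal_is_reserved_path_py : Prop := ∀ (path : String), Dom_is_reserved_path_py path → Spec_is_reserved_path_py path (is_reserved_path_py path)

-- ===== LEMMAS AND PROOFS =====

-- For a '/'-free nonempty name p: A's per-prefix test on normalized equals "first segment = p".
lemma pv_key (norm p : List Char) (hp : p ≠ []) (hs : '/' ∉ p) :
    ((norm == p) || PySem.Chars.startswith norm (p ++ ['/']))
      = (norm.takeWhile (fun c => c != '/') == p) := by
  induction p generalizing norm with
  | nil => exact absurd rfl hp
  | cons q qs ih =>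
    have hq : q ≠ '/' := fun h => hs (h ▸ List.mem_cons_self)
    have hqs : '/' ∉ qs := fun h => hs (List.mem_cons_of_mem _ h)
    cases norm with
    | nil => simp [PySem.Chars.startswith]
    | cons c cs =>
      by_cases hc : c = '/'
      · subst hc
        simp [PySem.Chars.startswith, List.isPrefixOf, hq, Ne.symm hq]
      · by_cases hcq : c = q
        · subst hcq
          simp only [PySem.Chars.startswith, List.cons_append, List.isPrefixOf,
            List.takeWhile_cons, bne_iff_ne, ne_eq, hc, not_false_eq_true, if_true,
            List.cons_beq_cons, BEq.rfl, Bool.true_and]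
          rcases eq_or_ne qs [] with h | h
          · subst h
            cases cs with
            | nil => simp
            | cons d ds =>
              by_cases hd : d = '/' <;>
                simp [hd, List.isPrefixOf, Ne.symm]
          · exact ih cs h hqs
        · have h0 : (c == '/') = false := by simp [hc]
          have h1 : (c == q) = false := by simp [hcq]
          have h2 : (q == c) = false := by simp [Ne.symm hcq]
          simp [PySem.Chars.startswith, List.isPrefixOf, hc, h1, h2]

-- membership of [] after one advance step: a name matches iff it is c followed by a survivor
lemma pv_advance_any (c : Char) (cands : List (List Char)) (t : List Char) :
    ((pvAdvance c cands).any (fun s => t == s))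
      = (cands.any (fun s => (c :: t) == s)) := by
  unfold pvAdvance
  rw [List.any_filterMap]
  refine List.any_congr rfl fun a => ?_
  cases a with
  | nil => simp
  | cons d ds =>
    by_cases hdc : d = c
    · subst hdc; simp [List.cons_beq_cons]
    · simp only [if_neg hdc, List.cons_beq_cons]
      simp
      exact fun h _ => hdc h.symm

lemma pv_contains_nil (cands : List (List Char)) :
    (cands.contains ([] : List Char)) = cands.any (fun s => ([] : List Char) == s) := by
  induction cands with
  | nil => rfl
  | cons a as ih => cases a <;> simp_all

-- B's scan computes: some candidate equals the first segment of the scanned characters.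
lemma pv_walk_spec (cs : List Char) (cands : List (List Char)) :
    ((pvWalk cs cands).contains [])
      = (cands.any (fun s => cs.takeWhile (fun c => c != '/') == s)) := by
  induction cs generalizing cands with
  | nil => simpa using pv_contains_nil cands
  | cons c cs' ih =>
    by_cases hc : c = '/'
    · subst hc
      simpa [pvWalk, List.takeWhile_cons] using pv_contains_nil cands
    · simp only [pvWalk, hc, if_false, ih, pv_advance_any, List.takeWhile_cons,
        bne_iff_ne, ne_eq, not_false_eq_true, if_true]

-- ===== VERDICT (by name: the statement is the Claim_ definition above) =====
theorem is_reserved_path_py_spec : Claim_equal_is_reserved_path_py := by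
  intro path _
  unfold Spec_is_reserved_path_py is_reserved_path_py is_reserved_path_py_alt
  rw [pv_walk_spec]
  generalize path.toList.dropWhile (fun c => c == '/') = norm
  have hnames : pvReservedNames = pvReservedPrefixes := rfl
  rw [hnames]
  simp only [pvReservedPrefixes, List.any_cons, List.any_nil, Bool.or_false,
    pv_key norm "upload".toList (by decide) (by decide),
    pv_key norm "upload-chunk".toList (by decide) (by decide),
    pv_key norm "upload-status".toList (by decide) (by decide),
    pv_key norm "download".toList (by decide) (by decide),
    pv_key norm "files".toList (by decide) (by decide),
    pv_key norm "delete".toList (by decide) (by decide),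
    pv_key norm "healthz".toList (by decide) (by decide),
    pv_key norm "docs".toList (by decide) (by decide),
    pv_key norm "redoc".toList (by decide) (by decide),
    pv_key norm "openapi.json".toList (by decide) (by decide),
    pv_key norm "relay".toList (by decide) (by decide),
    pv_key norm "static".toList (by decide) (by decide)]
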